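-- pv_equiv track=rewrite | github.com/nbiish/ferris-fall2025-ai-cybersecurity-final | python/agents/workers.py | _extract_document_path
-- ===== SOURCE A (Python) =====
-- from typing import Any, Dict, List
--
-- def _extract_document_path(messages: List[Dict[str, Any]]) -> str:
--     """Extract document path from messages."""
--     for msg in reversed(messages):
--         content = msg.get("content", "")
--         # Simple path extraction - would be more sophisticated in production
--         if "/" in content or "\\" in content:
--             words = content.split()
--             for word in words:
--                 if "/" in word or "\\" in word:
--                     return word.strip("'\"")
--     return ""
-- ===== SOURCE B (Python) =====
-- from typing import Any, Dict, List
--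
-- def _extract_document_path(messages: List[Dict[str, Any]]) -> str:
--     """Extract document path from messages (single forward pass, last match wins)."""
--     result = ""
--     for msg in messages:
--         content = msg.get("content", "")
--         word = next((w for w in content.split() if "/" in w or "\\" in w), None)
--         if word is not None:
--             result = word.strip("'\"")
--     return result
-- ===== Notes on version B (the rewrite author's own statement) =====
-- stated objective: alternative
-- what changed: Single forward pass with a last-match accumulator and a generator-based first-separator-word lookup, replacing A's reversed outer loop with nested early returns and its redundant substring guard.
import Mathlib
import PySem

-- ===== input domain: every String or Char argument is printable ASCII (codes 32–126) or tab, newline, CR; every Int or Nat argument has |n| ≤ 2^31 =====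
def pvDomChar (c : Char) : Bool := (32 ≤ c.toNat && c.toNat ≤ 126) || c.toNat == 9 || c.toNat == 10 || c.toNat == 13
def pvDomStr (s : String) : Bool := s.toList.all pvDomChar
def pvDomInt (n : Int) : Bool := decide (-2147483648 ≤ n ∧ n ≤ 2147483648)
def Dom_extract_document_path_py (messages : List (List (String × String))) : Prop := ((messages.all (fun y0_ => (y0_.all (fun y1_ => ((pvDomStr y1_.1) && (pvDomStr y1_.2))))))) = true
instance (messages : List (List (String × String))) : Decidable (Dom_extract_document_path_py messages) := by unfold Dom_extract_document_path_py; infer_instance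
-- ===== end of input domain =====

-- B replaces A's reversed loop with nested early returns by a single forward pass
-- keeping the last matching message's first separator word (objective: alternative decomposition).

-- ===== PORT A =====
-- inner 'for word in words' loop with early return
def pvAInner : List String → Option String
  | [] => none
  | w :: ws =>
    if PySem.Str.isIn "/" w || PySem.Str.isIn "\\" w then
      some (PySem.Str.stripChars w "'\"")
    else pvAInner ws

-- outer 'for msg in reversed(messages)' loop with early return
def pvALoop : List (List (String × String)) → String
  | [] => ""
  | msg :: rest =>
    let content := (PySem.Dict.mk msg).getD "content" ""
    if PySem.Str.isIn "/" content || PySem.Str.isIn "\\" content then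
      match pvAInner (PySem.Str.split₀ content) with
      | some w => w
      | none => pvALoop rest
    else pvALoop rest

def extract_document_path_py (messages : List (List (String × String))) : String :=
  pvALoop messages.reverse

-- ===== PORT B =====
-- first separator word of a message's content ('next' over the generator)
def pvBHit (content : String) : Option String :=
  (PySem.Str.split₀ content).find? (fun w => PySem.Str.isIn "/" w || PySem.Str.isIn "\\" w)

def extract_document_path_py_alt (messages : List (List (String × String))) : String :=
  messages.foldl
    (fun result msg =>
      match pvBHit ((PySem.Dict.mk msg).getD "content" "") with
      | some w => PySem.Str.stripChars w "'\""
      | none => result)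
    ""

-- ===== PRECONDITION & SPEC =====
def Spec_extract_document_path_py (messages : List (List (String × String))) (out : String) : Prop := out = extract_document_path_py_alt messages
instance (messages : List (List (String × String))) (out : String) : Decidable (Spec_extract_document_path_py messages out) := by unfold Spec_extract_document_path_py; infer_instance

-- ===== CLAIM (what is proved, stated in full; the proofs are below) =====
def Claim_equal_extract_document_path_py : Prop := ∀ (messages : List (List (String × String))), Dom_extract_document_path_py messages → Spec_extract_document_path_py messages (extract_document_path_py messages)

-- ===== LEMMAS AND PROOFS =====

def pvStrip (w : String) : String := PySem.Str.stripChars w "'\""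

def pvSep (w : String) : Bool := PySem.Str.isIn "/" w || PySem.Str.isIn "\\" w

-- A's per-message result (guard, then first separator word of the split, stripped)
def pvHitA (msg : List (String × String)) : Option String :=
  if pvSep ((PySem.Dict.mk msg).getD "content" "") then
    pvAInner (PySem.Str.split₀ ((PySem.Dict.mk msg).getD "content" ""))
  else none

-- B's per-message result
def pvHitB (msg : List (String × String)) : Option String :=
  (pvBHit ((PySem.Dict.mk msg).getD "content" "")).map pvStrip

-- every char of a word produced by split₀.go occurs in the remaining input or the current word
theorem pvGoChars (s : List Char) : ∀ (cur : List Char) (acc : List (List Char)) (w : List Char),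
    w ∈ PySem.Chars.split₀.go s cur acc → w ∈ acc ∨ ∀ c ∈ w, c ∈ s ∨ c ∈ cur := by
  induction s with
  | nil =>
    intro cur acc w hw
    simp only [PySem.Chars.split₀.go] at hw
    split at hw
    · exact Or.inl (by simpa using hw)
    · rcases (by simpa using hw : w ∈ acc ∨ w = cur.reverse) with h | rfl
      · exact Or.inl h
      · exact Or.inr (fun c hc => Or.inr (by simpa using hc))
  | cons c rest ih =>
    intro cur acc w hw
    simp only [PySem.Chars.split₀.go] at hw
    by_cases hsp : PySem.Chars.isspace c = true
    · rw [if_pos hsp] at hw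
      split at hw
      · rcases ih [] acc w hw with h | h
        · exact Or.inl h
        · exact Or.inr fun d hd => Or.inl (List.mem_cons_of_mem _ ((h d hd).resolve_right (by simp)))
      · rcases ih [] (cur.reverse :: acc) w hw with h | h
        · rcases List.mem_cons.mp h with rfl | h2
          · exact Or.inr fun d hd => Or.inr (by simpa using hd)
          · exact Or.inl h2
        · exact Or.inr fun d hd => Or.inl (List.mem_cons_of_mem _ ((h d hd).resolve_right (by simp)))
    · rw [if_neg hsp] at hw
      rcases ih (c :: cur) acc w hw with h | h
      · exact Or.inl h
      · refine Or.inr fun d hd => ?_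
        rcases h d hd with h2 | h2
        · exact Or.inl (List.mem_cons_of_mem _ h2)
        · rcases List.mem_cons.mp h2 with rfl | h3
          · exact Or.inl List.mem_cons_self
          · exact Or.inr h3

theorem pvSplitChars (s w : List Char) (hw : w ∈ PySem.Chars.split₀ s) : ∀ c ∈ w, c ∈ s := by
  intro c hc
  rcases pvGoChars s [] [] w hw with h | h
  · simp at h
  · simpa using h c hc

theorem pvIsInSingleton (a : Char) (s : List Char) : PySem.Chars.isIn [a] s = true ↔ a ∈ s := by
  rw [PySem.Chars.isIn_iff_infix]
  constructor
  · exact fun h => h.sublist.subset (List.mem_singleton_self a)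
  · intro h
    obtain ⟨t, u, rfl⟩ := List.append_of_mem h
    exact ⟨t, u, by simp⟩

-- the inner early-return loop is find? followed by the strip
theorem pvAInner_eq (ws : List String) : pvAInner ws = (ws.find? pvSep).map pvStrip := by
  induction ws with
  | nil => rfl
  | cons w ws ih =>
    show (if pvSep w then some (PySem.Str.stripChars w "'\"") else pvAInner ws)
        = ((w :: ws).find? pvSep).map pvStrip
    cases h : pvSep w
    · rw [List.find?_cons_of_neg (by simp [h]), if_neg (by simp)]
      exact ih
    · rw [List.find?_cons_of_pos h]
      rfl

-- if the content has no separator, no split word has one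
theorem pvNoSep (content : String) (hg : pvSep content = false) :
    (PySem.Str.split₀ content).find? pvSep = none := by
  rw [List.find?_eq_none]
  intro w hw
  simp only [PySem.Str.split₀, List.mem_map] at hw
  obtain ⟨u, hu, rfl⟩ := hw
  simp only [pvSep, PySem.Str.isIn, Bool.or_eq_false_iff] at hg
  have hchars := pvSplitChars content.toList u hu
  have hsl : ("/" : String).toList = ['/'] := by decide
  have hbl : ("\\" : String).toList = ['\\'] := by decide
  simp only [pvSep, PySem.Str.isIn, Bool.or_eq_true, not_or, hsl, hbl] at ⊢
  constructor
  · intro hIn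
    have h1 : '/' ∈ u := by
      have := (pvIsInSingleton '/' (String.ofList u).toList).mp (by simpa [hsl] using hIn)
      simpa using this
    have h2 := (pvIsInSingleton '/' content.toList).mpr (hchars _ h1)
    rw [hsl] at hg
    simp [h2] at hg
  · intro hIn
    have h1 : '\\' ∈ u := by
      have := (pvIsInSingleton '\\' (String.ofList u).toList).mp (by simpa [hbl] using hIn)
      simpa using this
    have h2 := (pvIsInSingleton '\\' content.toList).mpr (hchars _ h1)
    rw [hbl] at hg
    simp [h2] at hg

-- A's outer guard is redundant: per message, A and B compute the same option
theorem pvHit_eq : pvHitA = pvHitB := by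
  funext msg
  unfold pvHitA pvHitB pvBHit
  rw [pvAInner_eq,
    show (fun w => PySem.Str.isIn "/" w || PySem.Str.isIn "\\" w) = pvSep from rfl]
  cases hg : pvSep ((PySem.Dict.mk msg).getD "content" "")
  · rw [if_neg (by simp), pvNoSep _ hg]
    rfl
  · rw [if_pos rfl]

-- A's reversed early-return loop is findSome? over pvHitA
theorem pvALoop_cons (msg : List (String × String)) (rest : List (List (String × String))) :
    pvALoop (msg :: rest) = (pvHitA msg).getD (pvALoop rest) := by
  show (let content := (PySem.Dict.mk msg).getD "content" "";
      if PySem.Str.isIn "/" content || PySem.Str.isIn "\\" content then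
        match pvAInner (PySem.Str.split₀ content) with
        | some w => w
        | none => pvALoop rest
      else pvALoop rest) = _
  simp only [pvHitA]
  cases hg : pvSep ((PySem.Dict.mk msg).getD "content" "")
  · rw [if_neg (by simpa [pvSep] using hg), if_neg (by simp)]
    rfl
  · rw [if_pos (by simpa [pvSep] using hg), if_pos rfl]
    cases pvAInner (PySem.Str.split₀ ((PySem.Dict.mk msg).getD "content" "")) <;> rfl

theorem pvALoop_eq (l : List (List (String × String))) : pvALoop l = (l.findSome? pvHitA).getD "" := by
  induction l with
  | nil => rfl
  | cons msg rest ih =>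
    rw [pvALoop_cons, List.findSome?_cons]
    cases h : pvHitA msg
    · simpa using ih
    · rfl

-- B's forward fold is findSome? over the reversed list
theorem pvFold_eq (l : List (List (String × String))) : ∀ (r : String),
    l.foldl (fun result msg =>
      match pvBHit ((PySem.Dict.mk msg).getD "content" "") with
      | some w => PySem.Str.stripChars w "'\""
      | none => result) r = (l.reverse.findSome? pvHitB).getD r := by
  induction l with
  | nil => intro r; rfl
  | cons msg rest ih =>
    intro r
    rw [List.foldl_cons, ih, List.reverse_cons, List.findSome?_append]
    cases h : rest.reverse.findSome? pvHitB with
    | some w => simp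
    | none =>
      simp only [Option.or]
      cases hb : pvBHit ((PySem.Dict.mk msg).getD "content" "") with
      | some w => simp [pvHitB, hb, pvStrip]
      | none => simp [pvHitB, hb]

-- ===== VERDICT (by name: the statement is the Claim_ definition above) =====
theorem extract_document_path_py_spec : Claim_equal_extract_document_path_py := by
  intro messages _
  show extract_document_path_py messages = extract_document_path_py_alt messages
  unfold extract_document_path_py extract_document_path_py_alt
  rw [pvALoop_eq, pvFold_eq, pvHit_eq]
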